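-- pv_equiv track=rewrite | github.com/leeyeonho1001/text-mining | tagged2context.py | get_index_terms
-- ===== SOURCE A (Python) =====
-- def get_index_terms(mt_list):
--     index_terms = []  #색인어 리스트
--     compound = []  #현재 복합어를 구성하는 단일어 리스트
--     sl = False #복합어의 SL 처리
--
--     single_pos = {'NNG', 'NNP', 'SH'}
--     compound_pos = {'NNG', 'NNP', 'NR', 'NNB', 'SL', 'SH', 'SN'}
--
--     for morph, tag in mt_list:
--         if tag in single_pos:
--             index_terms.append(morph)
--             compound.append(morph)
--             if tag == 'SL':
--                 sl = True
--
--         elif tag in compound_pos: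
--             compound.append(morph)
--             if tag == 'SL':
--                 sl = True
--
--         if tag not in compound_pos:
--             if compound:
--                 if len(compound) >= 2:
--                     index_terms.append(''.join(compound))
--                 elif sl == True:
--                     index_terms.append(compound[0])
--
--                 sl = False
--                 compound = []
--
--     if compound:
--         if len(compound) >= 2:
--             index_terms.append(''.join(compound))
--         elif sl == True:
--             index_terms.append(compound[0])
--
--     return index_terms
-- ===== SOURCE B (Python) =====
-- def get_index_terms(mt_list):
--     single_pos = {'NNG', 'NNP', 'SH'}
--     compound_pos = {'NNG', 'NNP', 'NR', 'NNB', 'SL', 'SH', 'SN'}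
--
--     # split into maximal runs of compound_pos-tagged tokens
--     runs = []
--     current = []
--     for morph, tag in mt_list:
--         if tag in compound_pos:
--             current.append((morph, tag))
--         elif current:
--             runs.append(current)
--             current = []
--     if current:
--         runs.append(current)
--
--     terms = []
--     for run in runs:
--         for morph, tag in run:
--             if tag in single_pos:
--                 terms.append(morph)
--         if len(run) >= 2:
--             terms.append(''.join(m for m, _ in run))
--         elif run[0][1] == 'SL':
--             terms.append(run[0][0])
--     return terms
-- ===== Notes on version B (the rewrite author's own statement) =====
-- stated objective: alternative
-- what changed: Replaces A's flat per-token state machine (index_terms/compound/sl mutable state plus a duplicated flush block) with a two-phase decomposition: first split the list into maximal runs of compound_pos-tagged tokens, then emit each run's single_pos morphs followed by its compound/SL term.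
import Mathlib
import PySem

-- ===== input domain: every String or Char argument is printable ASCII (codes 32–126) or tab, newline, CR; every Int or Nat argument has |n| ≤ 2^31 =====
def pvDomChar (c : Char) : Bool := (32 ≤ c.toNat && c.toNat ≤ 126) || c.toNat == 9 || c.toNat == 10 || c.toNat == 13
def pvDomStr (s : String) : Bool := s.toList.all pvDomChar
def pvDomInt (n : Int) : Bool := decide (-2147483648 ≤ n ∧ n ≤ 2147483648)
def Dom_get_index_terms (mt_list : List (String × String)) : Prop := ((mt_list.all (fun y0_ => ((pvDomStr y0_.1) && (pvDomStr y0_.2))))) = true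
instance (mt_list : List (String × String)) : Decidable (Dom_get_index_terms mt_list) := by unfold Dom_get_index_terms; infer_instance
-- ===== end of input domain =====

-- B replaces A's flat per-token state machine (with its duplicated flush block) by a
-- two-phase decomposition: split into maximal runs of compound_pos tokens, then process each run.

-- tag ∈ single_pos = {'NNG','NNP','SH'}
def pvSingle (t : String) : Bool := t == "NNG" || t == "NNP" || t == "SH"
-- tag ∈ compound_pos = {'NNG','NNP','NR','NNB','SL','SH','SN'}
def pvComp (t : String) : Bool :=
  t == "NNG" || t == "NNP" || t == "NR" || t == "NNB" || t == "SL" || t == "SH" || t == "SN"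

-- ===== PORT A =====
-- loop body of A: state = (index_terms, compound, sl)
def stepA (st : List String × List String × Bool) (p : String × String) :
    List String × List String × Bool :=
  let its := st.1; let comp := st.2.1; let sl := st.2.2
  let (its, comp, sl) :=
    if pvSingle p.2 then
      (its ++ [p.1], comp ++ [p.1], if p.2 == "SL" then true else sl)
    else if pvComp p.2 then
      (its, comp ++ [p.1], if p.2 == "SL" then true else sl)
    else (its, comp, sl)
  if ¬ pvComp p.2 then
    if comp ≠ [] then
      (if comp.length ≥ 2 then its ++ [String.join comp]
       else if sl then its ++ [comp.headD ""]   -- compound[0]; comp ≠ [] here, so headD is exact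
       else its, [], false)
    else (its, comp, sl)
  else (its, comp, sl)

def get_index_terms (mt_list : List (String × String)) : List String :=
  let st := mt_list.foldl stepA ([], [], false)
  let its := st.1; let comp := st.2.1; let sl := st.2.2
  if comp ≠ [] then
    if comp.length ≥ 2 then its ++ [String.join comp]
    else if sl then its ++ [comp.headD ""]      -- compound[0]; comp ≠ [] here, so headD is exact
    else its
  else its

-- ===== PORT B =====
-- phase 1 loop body: state = (runs, current)
def stepB (st : List (List (String × String)) × List (String × String)) (p : String × String) :
    List (List (String × String)) × List (String × String) :=
  if pvComp p.2 then (st.1, st.2 ++ [p])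
  else if st.2 ≠ [] then (st.1 ++ [st.2], [])
  else st

-- phase 2 loop body: emit one run's terms
def procB (terms : List String) (run : List (String × String)) : List String :=
  let terms := terms ++ (run.filter (fun p => pvSingle p.2)).map Prod.fst
  if run.length ≥ 2 then terms ++ [String.join (run.map Prod.fst)]
  else if (run.headD ("", "")).2 == "SL" then terms ++ [(run.headD ("", "")).1]
  else terms

def get_index_terms_alt (mt_list : List (String × String)) : List String :=
  let st := mt_list.foldl stepB ([], [])
  let runs := if st.2 ≠ [] then st.1 ++ [st.2] else st.1
  runs.foldl procB []

-- ===== PRECONDITION & SPEC =====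
def Spec_get_index_terms (mt_list : List (String × String)) (out : List String) : Prop := out = get_index_terms_alt mt_list
instance (mt_list : List (String × String)) (out : List String) : Decidable (Spec_get_index_terms mt_list out) := by unfold Spec_get_index_terms; infer_instance

-- ===== CLAIM (what is proved, stated in full; the proofs are below) =====
def Claim_equal_get_index_terms : Prop := ∀ (mt_list : List (String × String)), Dom_get_index_terms mt_list → Spec_get_index_terms mt_list (get_index_terms mt_list)

-- ===== LEMMAS AND PROOFS =====

-- proof-only helpers
def morphs (r : List (String × String)) : List String := r.map Prod.fst
def singles (r : List (String × String)) : List String :=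
  (r.filter (fun p => pvSingle p.2)).map Prod.fst
def hasSL (r : List (String × String)) : Bool := r.any (fun p => p.2 == "SL")
def runTerm (r : List (String × String)) : List String :=
  if r.length ≥ 2 then [String.join (morphs r)]
  else if (r.headD ("", "")).2 == "SL" then [(r.headD ("", "")).1]
  else []
def procRun (r : List (String × String)) : List String := singles r ++ runTerm r

-- the runs of (r0-prefix continued by l): a recursive rendering of B's first loop
def runsFrom (r0 : List (String × String)) : List (String × String) → List (List (String × String))
  | [] => if r0 = [] then [] else [r0]
  | x :: xs =>
    if pvComp x.2 then runsFrom (r0 ++ [x]) xs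
    else if r0 = [] then runsFrom [] xs
    else r0 :: runsFrom [] xs

lemma single_comp {t : String} (h : pvSingle t = true) : pvComp t = true := by
  simp only [pvSingle, Bool.or_eq_true, beq_iff_eq] at h
  simp only [pvComp, Bool.or_eq_true, beq_iff_eq]
  tauto

lemma single_not_SL {t : String} (h : pvSingle t = true) : (t == "SL") = false := by
  simp only [pvSingle, Bool.or_eq_true, beq_iff_eq] at h
  rcases h with (h | h) | h <;> subst h <;> decide

lemma B_runs (l : List (String × String)) :
    ∀ runs r0,
    (let st := l.foldl stepB (runs, r0)
     if st.2 ≠ [] then st.1 ++ [st.2] else st.1) = runs ++ runsFrom r0 l := by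
  induction l with
  | nil =>
    intro runs r0
    by_cases h : r0 = [] <;> simp [runsFrom, h]
  | cons x xs ih =>
    intro runs r0
    by_cases hc : pvComp x.2
    · simpa [stepB, hc, runsFrom] using ih runs (r0 ++ [x])
    · by_cases h0 : r0 = []
      · simpa [stepB, hc, h0, runsFrom] using ih runs []
      · simpa [stepB, hc, h0, runsFrom] using ih (runs ++ [r0]) []

lemma procB_flat (runs : List (List (String × String))) :
    ∀ init, runs.foldl procB init = init ++ runs.flatMap procRun := by
  induction runs with
  | nil => intro init; simp
  | cons r rs ih =>
    intro init
    simp only [List.foldl_cons, List.flatMap_cons, ih]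
    simp only [procB, procRun, singles, runTerm, morphs]
    split_ifs <;> simp

lemma B_char (l : List (String × String)) :
    get_index_terms_alt l = (runsFrom [] l).flatMap procRun := by
  have h := B_runs l [] []
  simp only [get_index_terms_alt]
  simp only at h
  rw [h, List.nil_append, procB_flat, List.nil_append]

-- flushing a non-empty current run r equals runTerm r
lemma flush_eq (p : String × String) (r : List (String × String)) (its : List String) :
    (if (morphs (p :: r)).length ≥ 2 then its ++ [String.join (morphs (p :: r))]
     else if hasSL (p :: r) then its ++ [(morphs (p :: r)).headD ""]
     else its) = its ++ runTerm (p :: r) := by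
  cases r with
  | nil =>
    simp only [morphs, hasSL, runTerm, List.map_cons, List.map_nil, List.length_cons,
      List.length_nil, List.any_cons, List.any_nil, Bool.or_false, List.headD_cons]
    by_cases h : p.2 = "SL" <;> simp [h]
  | cons q rs =>
    have h2 : (morphs (p :: q :: rs)).length ≥ 2 := by simp [morphs]
    have h2' : (p :: q :: rs).length ≥ 2 := by simp
    simp [runTerm, h2, h2']

lemma A_main (l : List (String × String)) :
    ∀ r0 its, (∀ p ∈ r0, pvComp p.2 = true) →
    (let st := l.foldl stepA (its ++ singles r0, morphs r0, hasSL r0)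
     if st.2.1 ≠ [] then
       if st.2.1.length ≥ 2 then st.1 ++ [String.join st.2.1]
       else if st.2.2 then st.1 ++ [st.2.1.headD ""]
       else st.1
     else st.1) = its ++ (runsFrom r0 l).flatMap procRun := by
  induction l with
  | nil =>
    intro r0 its _
    cases r0 with
    | nil => simp [runsFrom, morphs, singles, hasSL]
    | cons p r =>
      have hf := flush_eq p r (its ++ singles (p :: r))
      simp only [runsFrom]
      simp only [List.foldl_nil]
      have hne : morphs (p :: r) ≠ [] := by simp [morphs]
      simp only [hne, ne_eq, not_false_eq_true, if_true, reduceCtorEq]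
      rw [hf, List.append_assoc]
      simp [procRun]
  | cons x xs ih =>
    intro r0 its hall
    by_cases hc : pvComp x.2
    · by_cases hs : pvSingle x.2
      · have hsl := single_not_SL hs
        have h1 : singles (r0 ++ [x]) = singles r0 ++ [x.1] := by simp [singles, hs]
        have h2 : morphs (r0 ++ [x]) = morphs r0 ++ [x.1] := by simp [morphs]
        have h3 : hasSL (r0 ++ [x]) = hasSL r0 := by simp [hasSL, hsl]
        have hall' : ∀ p ∈ r0 ++ [x], pvComp p.2 = true := by
          intro p hp; rcases List.mem_append.mp hp with h | h
          · exact hall p h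
          · simp at h; simp [h, hc]
        have := ih (r0 ++ [x]) its hall'
        simp only [h1, h2, h3, List.append_assoc] at this
        simpa [stepA, hc, hs, hsl, runsFrom] using this
      · have h1 : singles (r0 ++ [x]) = singles r0 := by simp [singles, hs]
        have h2 : morphs (r0 ++ [x]) = morphs r0 ++ [x.1] := by simp [morphs]
        have h3 : hasSL (r0 ++ [x]) = ((x.2 == "SL") || hasSL r0) := by
          simp [hasSL, Bool.or_comm]
        have hall' : ∀ p ∈ r0 ++ [x], pvComp p.2 = true := by
          intro p hp; rcases List.mem_append.mp hp with h | h
          · exact hall p h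
          · simp at h; simp [h, hc]
        have := ih (r0 ++ [x]) its hall'
        simp only [h1, h2, h3] at this
        by_cases hx : x.2 == "SL"
        · simpa [stepA, hc, hs, hx, runsFrom] using this
        · simpa [stepA, hc, hs, hx, runsFrom] using this
    · have hs : pvSingle x.2 = false := by
        by_contra h
        exact hc (single_comp (by simpa using h))
      cases r0 with
      | nil =>
        have := ih [] its (by simp)
        simpa [stepA, hc, hs, runsFrom, singles, morphs, hasSL] using this
      | cons p r =>
        have hf := flush_eq p r (its ++ singles (p :: r))
        have hne : morphs (p :: r) ≠ [] := by simp [morphs]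
        have hstep : stepA (its ++ singles (p :: r), morphs (p :: r), hasSL (p :: r)) x
            = (its ++ singles (p :: r) ++ runTerm (p :: r), [], false) := by
          simp only [stepA, hs, hc, Bool.false_eq_true, if_false, not_false_eq_true, if_true,
            hne, ne_eq]
          rw [hf]
        have hih := ih [] (its ++ singles (p :: r) ++ runTerm (p :: r)) (by simp)
        simp only [singles, morphs, hasSL, List.filter_nil, List.map_nil, List.any_nil,
          List.append_nil] at hih
        simp only [List.foldl_cons, hstep, runsFrom, reduceCtorEq, if_false, List.flatMap_cons]
        simp only [singles, morphs, hasSL] at hih ⊢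
        rw [hih]
        simp [procRun, singles, runTerm, morphs, hc]

-- ===== VERDICT (by name: the statement is the Claim_ definition above) =====
theorem get_index_terms_spec : Claim_equal_get_index_terms := by
  intro l _
  show get_index_terms l = get_index_terms_alt l
  have hA := A_main l [] [] (by simp)
  simp only [singles, morphs, hasSL, List.filter_nil, List.map_nil, List.any_nil,
    List.nil_append] at hA
  rw [B_char]
  simpa [get_index_terms] using hA
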